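-- pv_equiv track=rewrite | github.com/christian-doucette/tolkein_text | process_data.py | get_padded_size_n
-- ===== SOURCE A (Python) =====
-- def get_padded_size_n(list_of_subarrs, n):
--     features = []
--     labels = []
--     for subarr in list_of_subarrs:
--         for i in range(1, len(subarr)+1):
--             padding = [0] * (n-i)
--             start = max(i-n,0) #max(i-k, 0)
--             end = i
--
--             padded_subarr = padding + subarr[start:end]
--             features.append(padded_subarr[0:-1])
--             labels.append(padded_subarr[-1])
--
--
--     return features, labels
-- ===== SOURCE B (Python) =====
-- def get_padded_size_n(list_of_subarrs, n):
--     features = []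
--     labels = []
--     for subarr in list_of_subarrs:
--         w = [0] * (n - 1)
--         for x in subarr:
--             features.append(w)
--             labels.append(x)
--             w = (w + [x])[1:]
--     return features, labels
-- ===== Notes on version B (the rewrite author's own statement) =====
-- stated objective: alternative
-- what changed: B maintains the length-(n-1) context window incrementally by the recurrence w = (w+[x])[1:] while streaming over the elements, so it never slices the input, never builds per-step padding, and takes labels directly from the elements; A recomputes each window from scratch with index arithmetic, a fresh [0]*(n-i) padding list and a slice subarr[max(i-n,0):i] per position.
import Mathlib
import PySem

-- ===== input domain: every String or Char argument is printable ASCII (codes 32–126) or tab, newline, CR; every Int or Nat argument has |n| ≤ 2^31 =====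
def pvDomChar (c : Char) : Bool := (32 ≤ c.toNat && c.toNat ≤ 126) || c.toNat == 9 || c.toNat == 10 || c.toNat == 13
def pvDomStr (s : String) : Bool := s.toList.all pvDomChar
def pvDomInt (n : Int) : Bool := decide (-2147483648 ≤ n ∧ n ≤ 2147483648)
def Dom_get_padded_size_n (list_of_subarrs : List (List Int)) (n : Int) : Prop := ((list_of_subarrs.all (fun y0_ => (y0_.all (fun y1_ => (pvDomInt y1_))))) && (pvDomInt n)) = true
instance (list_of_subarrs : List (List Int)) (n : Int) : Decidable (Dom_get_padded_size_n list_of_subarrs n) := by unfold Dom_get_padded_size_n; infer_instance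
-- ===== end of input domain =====

-- B maintains the context window incrementally (w = (w+[x])[1:]) while streaming the elements,
-- instead of A's per-position padding construction and input slicing (alternative decomposition, same cost).


-- ===== PORT A =====
-- padded_subarr[-1] is ported with pyGetD (default 0): under Pre_ the window has length n ≥ 1,
-- so the default is never used; the default case is exactly where Python raises IndexError (excluded by Pre_).
def get_padded_size_n (list_of_subarrs : List (List Int)) (n : Int) : List (List Int) × List Int :=
  list_of_subarrs.foldl (fun acc subarr =>
    (PySem.List.pyRange 1 ((subarr.length : Int) + 1) 1).foldl (fun acc i =>
      let padding : List Int := List.replicate (n - i).toNat 0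
      let start : Int := max (i - n) 0
      let padded_subarr := padding ++ PySem.List.slice subarr (some start) (some i)
      (acc.1 ++ [PySem.List.slice padded_subarr (some 0) (some (-1))],
       acc.2 ++ [PySem.List.pyGetD padded_subarr (-1) 0])) acc) ([], [])

-- ===== PORT B =====
-- B streams the elements, carrying the rolling window w; `(w + [x])[1:]` is the slice from 1.
def get_padded_size_n_alt (list_of_subarrs : List (List Int)) (n : Int) : List (List Int) × List Int :=
  list_of_subarrs.foldl (fun acc subarr =>
    (subarr.foldl (fun (st : (List (List Int) × List Int) × List Int) x =>
        ((st.1.1 ++ [st.2], st.1.2 ++ [x]), PySem.List.slice (st.2 ++ [x]) (some 1) none))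
      (acc, List.replicate (n - 1).toNat 0)).1) ([], [])

-- ===== PRECONDITION & SPEC =====
-- Pre_ excludes exactly the inputs where Python A raises IndexError: n ≤ 0 together with a
-- nonempty subarray makes padded_subarr empty, and padded_subarr[-1] raises.
def Pre_get_padded_size_n (list_of_subarrs : List (List Int)) (n : Int) : Prop :=
  1 ≤ n ∨ ∀ s ∈ list_of_subarrs, s = []
instance (list_of_subarrs : List (List Int)) (n : Int) : Decidable (Pre_get_padded_size_n list_of_subarrs n) := by unfold Pre_get_padded_size_n; infer_instance
def pvWitness_get_padded_size_n : List (List Int) × Int := ([[1, 2, 3], [], [4]], 3)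
def Spec_get_padded_size_n (list_of_subarrs : List (List Int)) (n : Int) (out : List (List Int) × List Int) : Prop := out = get_padded_size_n_alt list_of_subarrs n
instance (list_of_subarrs : List (List Int)) (n : Int) (out : List (List Int) × List Int) : Decidable (Spec_get_padded_size_n list_of_subarrs n out) := by unfold Spec_get_padded_size_n; infer_instance

-- ===== CLAIM (what is proved, stated in full; the proofs are below) =====
def Claim_equal_get_padded_size_n : Prop := ∀ (list_of_subarrs : List (List Int)) (n : Int), Dom_get_padded_size_n list_of_subarrs n → Pre_get_padded_size_n list_of_subarrs n → Spec_get_padded_size_n list_of_subarrs n (get_padded_size_n list_of_subarrs n)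

-- ===== LEMMAS AND PROOFS =====

-- B's rolling window after k consumed elements: the last (n-1) cells of padding ++ first k elements.
def pvW (subarr : List Int) (n : Int) (k : ℕ) : List Int :=
  (List.replicate (n - 1).toNat 0 ++ subarr.take k).drop k

theorem pvW_zero (subarr : List Int) (n : Int) :
    pvW subarr n 0 = List.replicate (n - 1).toNat 0 := by
  simp [pvW]

theorem pvW_concat (subarr : List Int) (n : Int) (k : ℕ) (hk : k < subarr.length) :
    pvW subarr n k ++ [subarr[k]] =
      (List.replicate (n - 1).toNat (0 : Int) ++ subarr.take (k + 1)).drop k := by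
  unfold pvW
  rw [← List.drop_append_of_le_length (by simp; omega), List.append_assoc,
    ← List.take_succ_eq_append_getElem hk]

theorem pvW_succ (subarr : List Int) (n : Int) (k : ℕ) (hk : k < subarr.length) :
    PySem.List.slice (pvW subarr n k ++ [subarr[k]]) (some 1) none = pvW subarr n (k + 1) := by
  rw [PySem.List.slice_from_one, pvW_concat subarr n k hk, pvW, List.tail_drop]

-- A's padded window at i = k+1 equals B's rolling window with the next element appended.
theorem pvPadded_eq (subarr : List Int) (n : Int) (hn : 1 ≤ n) (k : ℕ) (hk : k < subarr.length) :
    List.replicate (n - ((k : Int) + 1)).toNat (0 : Int)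
        ++ PySem.List.slice subarr (some (max (((k : Int) + 1) - n) 0)) (some ((k : Int) + 1))
      = pvW subarr n k ++ [subarr[k]] := by
  lift n to ℕ using (by omega) with nn
  have h2 : ((nn : Int) - ((k : Int) + 1)).toNat = nn - (k + 1) := by omega
  have h3 : max (((k : Int) + 1) - (nn : Int)) 0 = ((k + 1 - nn : Nat) : Int) := by omega
  have h4 : ((k : Int) + 1) = ((k + 1 : Nat) : Int) := by push_cast; ring
  rw [h2, h3, h4, PySem.List.slice_natCast, pvW_concat subarr nn k hk]
  have h1 : ((nn : Int) - 1).toNat = nn - 1 := by omega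
  rw [h1, List.drop_append, List.drop_replicate, List.length_replicate,
    List.drop_take]
  have e1 : nn - 1 - k = nn - (k + 1) := by omega
  have e2 : k - (nn - 1) = k + 1 - nn := by omega
  rw [e1, e2]

-- B's inner element-fold from position k equals A's inner range-fold over i = k+1 .. len.
theorem pv_inner (n : Int) (hn : 1 ≤ n) (subarr : List Int) :
    ∀ (m k : ℕ), k + m = subarr.length → ∀ (acc : List (List Int) × List Int),
    ((subarr.drop k).foldl
        (fun (st : (List (List Int) × List Int) × List Int) x =>
          ((st.1.1 ++ [st.2], st.1.2 ++ [x]), PySem.List.slice (st.2 ++ [x]) (some 1) none))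
        (acc, pvW subarr n k)).1
      = (List.range' k m).foldl
          (fun (acc : List (List Int) × List Int) (j : ℕ) =>
            (fun (acc : List (List Int) × List Int) (i : Int) =>
              let padding : List Int := List.replicate (n - i).toNat 0
              let start : Int := max (i - n) 0
              let padded_subarr := padding ++ PySem.List.slice subarr (some start) (some i)
              (acc.1 ++ [PySem.List.slice padded_subarr (some 0) (some (-1))],
               acc.2 ++ [PySem.List.pyGetD padded_subarr (-1) 0])) acc (1 + (j : Int))) acc := by
  intro m
  induction m with
  | zero =>
    intro k hk acc
    rw [List.drop_of_length_le (by omega)]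
    rfl
  | succ m ih =>
    intro k hk acc
    have hklt : k < subarr.length := by omega
    rw [List.drop_eq_getElem_cons hklt, List.range'_succ]
    have hp : (1 : Int) + (k : Int) = (k : Int) + 1 := by ring
    have hpad := pvPadded_eq subarr n hn k hklt
    simp only [List.foldl_cons, PySem.List.slice_zero_start, PySem.List.slice_to_neg_one] at ih ⊢
    rw [pvW_succ subarr n k hklt, hp, hpad, List.dropLast_concat,
      PySem.List.pyGetD_neg_one_append_singleton]
    exact ih (k + 1) (by omega) _

theorem get_padded_size_n_spec : Claim_equal_get_padded_size_n := by
  intro xs n _ hpre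
  unfold Spec_get_padded_size_n get_padded_size_n get_padded_size_n_alt
  apply PySem.List.foldl_congr_mem
  intro acc subarr hmem
  rcases hpre with hn | hempty
  · rw [PySem.List.pyRange_one 1 ((subarr.length : Int) + 1)]
    have hl1 : (((subarr.length : Int) + 1) - 1).toNat = subarr.length := by omega
    rw [hl1, List.foldl_map, List.range_eq_range',
      show List.replicate (n - 1).toNat (0 : Int) = pvW subarr n 0 from (pvW_zero subarr n).symm]
    exact (pv_inner n hn subarr subarr.length 0 (by omega) acc).symm
  · rw [hempty subarr hmem]
    simp [PySem.List.pyRange_one_eq_nil]
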